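-- pv_equiv track=rewrite | github.com/arthuss/visionexe | engine/workers/regie_worker.py | insert_regie_block
-- ===== SOURCE A (Python) =====
-- def insert_regie_block(block, regie_line):
--     if not regie_line:
--         return block
--     if "### 0. REGIE" in block:
--         return block
--     lines = block.splitlines()
--     insert_idx = None
--     for idx, line in enumerate(lines):
--         if line.strip().startswith("**Dialog:**"):
--             insert_idx = idx + 1
--             break
--     if insert_idx is None:
--         for idx, line in enumerate(lines):
--             if line.strip().startswith("**Action:**"):
--                 insert_idx = idx + 1
--                 break
--     if insert_idx is None:
--         for idx, line in enumerate(lines):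
--             if line.strip().startswith("## "):
--                 insert_idx = idx + 1
--                 break
--     if insert_idx is None:
--         insert_idx = len(lines)
--
--     regie_lines = [
--         "",
--         "### 0. REGIE DATA (JSON)",
--         regie_line,
--         "",
--     ]
--     updated = lines[:insert_idx] + regie_lines + lines[insert_idx:]
--     return "\n".join(updated)
-- ===== SOURCE B (Python) =====
-- def insert_regie_block(block, regie_line):
--     if not regie_line:
--         return block
--     if "### 0. REGIE" in block:
--         return block
--     lines = block.splitlines()
--     dialog_idx = action_idx = hash_idx = None
--     for idx, line in enumerate(lines):
--         s = line.strip()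
--         if dialog_idx is None and s.startswith("**Dialog:**"):
--             dialog_idx = idx
--         if action_idx is None and s.startswith("**Action:**"):
--             action_idx = idx
--         if hash_idx is None and s.startswith("## "):
--             hash_idx = idx
--     if dialog_idx is not None:
--         insert_idx = dialog_idx + 1
--     elif action_idx is not None:
--         insert_idx = action_idx + 1
--     elif hash_idx is not None:
--         insert_idx = hash_idx + 1
--     else:
--         insert_idx = len(lines)
--     regie_lines = ["", "### 0. REGIE DATA (JSON)", regie_line, ""]
--     return "\n".join(lines[:insert_idx] + regie_lines + lines[insert_idx:])
-- ===== Notes on version B (the rewrite author's own statement) =====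
-- stated objective: simpler
-- what changed: Replaces A's three sequential full scans of the lines (one per marker, each with its own enumerate loop) by one single pass that records the first index of each of the three markers, with the Dialog>Action>'## ' priority applied once after the loop.
import Mathlib
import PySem

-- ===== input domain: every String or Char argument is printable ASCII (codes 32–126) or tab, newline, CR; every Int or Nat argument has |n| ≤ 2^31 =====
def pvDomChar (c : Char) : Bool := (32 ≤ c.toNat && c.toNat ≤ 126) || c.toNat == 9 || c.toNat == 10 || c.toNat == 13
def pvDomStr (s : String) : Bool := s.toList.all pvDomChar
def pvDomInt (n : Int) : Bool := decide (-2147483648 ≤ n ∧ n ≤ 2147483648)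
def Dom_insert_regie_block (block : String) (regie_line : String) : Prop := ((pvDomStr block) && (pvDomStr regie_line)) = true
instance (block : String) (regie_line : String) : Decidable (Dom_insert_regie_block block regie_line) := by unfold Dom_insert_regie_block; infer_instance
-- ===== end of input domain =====

-- B replaces A's three sequential marker scans by one single pass recording the first
-- index of each marker, applying the priority afterwards (objective: simpler).

-- ===== PORT A =====
-- A's `for idx, line in enumerate(...): if pred: insert_idx = idx + 1; break` loop
def pvFindLoopA (p : String → Bool) : List String → Nat → Option Nat
  | [], _ => none
  | l :: rest, i => if p l then some (i + 1) else pvFindLoopA p rest (i + 1)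

def insert_regie_block (block : String) (regie_line : String) : String :=
  if regie_line = "" then block
  else if PySem.Str.isIn "### 0. REGIE" block then block
  else
    let lines := PySem.Str.splitlines block
    let i1 := pvFindLoopA (fun l => PySem.Str.startswith (PySem.Str.strip l) "**Dialog:**") lines 0
    let i2 := match i1 with
      | some i => some i
      | none => pvFindLoopA (fun l => PySem.Str.startswith (PySem.Str.strip l) "**Action:**") lines 0
    let i3 := match i2 with
      | some i => some i
      | none => pvFindLoopA (fun l => PySem.Str.startswith (PySem.Str.strip l) "## ") lines 0
    let insert_idx := i3.getD lines.length
    let regie_lines := ["", "### 0. REGIE DATA (JSON)", regie_line, ""]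
    PySem.Str.join "\n" (lines.take insert_idx ++ regie_lines ++ lines.drop insert_idx)

-- ===== PORT B =====
-- B's single pass: record the first index of each of the three markers
def pvScan3 : List String → Nat → Option Nat → Option Nat → Option Nat →
    Option Nat × Option Nat × Option Nat
  | [], _, d, a, h => (d, a, h)
  | l :: rest, i, d, a, h =>
    let s := PySem.Str.strip l
    pvScan3 rest (i + 1)
      (if d.isNone && PySem.Str.startswith s "**Dialog:**" then some i else d)
      (if a.isNone && PySem.Str.startswith s "**Action:**" then some i else a)
      (if h.isNone && PySem.Str.startswith s "## " then some i else h)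

def insert_regie_block_alt (block : String) (regie_line : String) : String :=
  if regie_line = "" then block
  else if PySem.Str.isIn "### 0. REGIE" block then block
  else
    let lines := PySem.Str.splitlines block
    let (d, a, h) := pvScan3 lines 0 none none none
    let insert_idx := match d, a, h with
      | some i, _, _ => i + 1
      | none, some i, _ => i + 1
      | none, none, some i => i + 1
      | none, none, none => lines.length
    let regie_lines := ["", "### 0. REGIE DATA (JSON)", regie_line, ""]
    PySem.Str.join "\n" (lines.take insert_idx ++ regie_lines ++ lines.drop insert_idx)

-- ===== PRECONDITION & SPEC =====
def Spec_insert_regie_block (block : String) (regie_line : String) (out : String) : Prop := out = insert_regie_block_alt block regie_line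
instance (block : String) (regie_line : String) (out : String) : Decidable (Spec_insert_regie_block block regie_line out) := by unfold Spec_insert_regie_block; infer_instance

-- ===== CLAIM (what is proved, stated in full; the proofs are below) =====
def Claim_equal_insert_regie_block : Prop := ∀ (block : String) (regie_line : String), Dom_insert_regie_block block regie_line → Spec_insert_regie_block block regie_line (insert_regie_block block regie_line)

-- ===== LEMMAS AND PROOFS =====

-- reference: absolute index of the first line satisfying p
def pvFirst (p : String → Bool) : List String → Nat → Option Nat
  | [], _ => none
  | l :: rest, i => if p l then some i else pvFirst p rest (i + 1)

-- strict first-some choice (Option.orElse without the thunk, for plain case proofs)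
def pvOr (x y : Option Nat) : Option Nat :=
  match x with
  | some v => some v
  | none => y

theorem pvFindLoopA_eq (p : String → Bool) (lines : List String) (i : Nat) :
    pvFindLoopA p lines i = (pvFirst p lines i).map (· + 1) := by
  induction lines generalizing i with
  | nil => rfl
  | cons l rest ih =>
    rw [pvFindLoopA, pvFirst]
    by_cases hp : p l
    · rw [if_pos hp, if_pos hp]; rfl
    · rw [if_neg hp, if_neg hp, ih]

theorem pvScan3_eq (lines : List String) (i : Nat) (d a h : Option Nat) :
    pvScan3 lines i d a h =
      (pvOr d (pvFirst (fun l => PySem.Str.startswith (PySem.Str.strip l) "**Dialog:**") lines i),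
       pvOr a (pvFirst (fun l => PySem.Str.startswith (PySem.Str.strip l) "**Action:**") lines i),
       pvOr h (pvFirst (fun l => PySem.Str.startswith (PySem.Str.strip l) "## ") lines i)) := by
  induction lines generalizing i d a h with
  | nil => cases d <;> cases a <;> cases h <;> rfl
  | cons l rest ih =>
    rw [pvScan3, ih]
    refine Prod.ext ?_ (Prod.ext ?_ ?_) <;> simp only
    · cases d
      · simp only [Option.isNone_none, Bool.true_and, pvFirst]
        by_cases hp : PySem.Str.startswith (PySem.Str.strip l) "**Dialog:**"
        · rw [if_pos hp, if_pos hp] <;> rfl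
        · rw [if_neg hp, if_neg hp] <;> rfl
      · simp only [Option.isNone_some, Bool.false_and, Bool.false_eq_true, if_false, pvOr]
    · cases a
      · simp only [Option.isNone_none, Bool.true_and, pvFirst]
        by_cases hp : PySem.Str.startswith (PySem.Str.strip l) "**Action:**"
        · rw [if_pos hp, if_pos hp] <;> rfl
        · rw [if_neg hp, if_neg hp] <;> rfl
      · simp only [Option.isNone_some, Bool.false_and, Bool.false_eq_true, if_false, pvOr]
    · cases h
      · simp only [Option.isNone_none, Bool.true_and, pvFirst]
        by_cases hp : PySem.Str.startswith (PySem.Str.strip l) "## "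
        · rw [if_pos hp, if_pos hp] <;> rfl
        · rw [if_neg hp, if_neg hp] <;> rfl
      · simp only [Option.isNone_some, Bool.false_and, Bool.false_eq_true, if_false, pvOr]

-- ===== VERDICT (by name: the statement is the Claim_ definition above) =====
theorem insert_regie_block_spec : Claim_equal_insert_regie_block := by
  intro block regie_line _
  unfold Spec_insert_regie_block insert_regie_block insert_regie_block_alt
  by_cases h0 : regie_line = ""
  · rw [if_pos h0, if_pos h0]
  rw [if_neg h0, if_neg h0]
  by_cases h1 : PySem.Str.isIn "### 0. REGIE" block = true
  · rw [if_pos h1, if_pos h1]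
  rw [if_neg h1, if_neg h1]
  simp only [pvScan3_eq, pvFindLoopA_eq]
  rcases hd : pvFirst (fun l => PySem.Str.startswith (PySem.Str.strip l) "**Dialog:**")
      (PySem.Str.splitlines block) 0 with _ | id
  · rcases ha : pvFirst (fun l => PySem.Str.startswith (PySem.Str.strip l) "**Action:**")
        (PySem.Str.splitlines block) 0 with _ | ia
    · rcases hh : pvFirst (fun l => PySem.Str.startswith (PySem.Str.strip l) "## ")
          (PySem.Str.splitlines block) 0 with _ | ih
      · simp only [hd, ha, hh, Option.map_none, pvOr, Option.getD_none]
      · simp only [hd, ha, hh, Option.map_none, Option.map_some, pvOr, Option.getD_some]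
    · simp only [hd, ha, Option.map_none, Option.map_some, pvOr, Option.getD_some]
  · simp only [hd, Option.map_some, pvOr, Option.getD_some]
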